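-- pv_equiv track=rewrite | github.com/liuliqiu/study | Euler/part4/p162.py | f
-- ===== SOURCE A (Python) =====
-- from math import factorial
--
-- def f(n, is_begin = True, contain_zero = True, number = 3):
--     """
--     >>> f(3)
--     4
--     >>> f(4)
--     258
--     >>> hex(sum(f(i) for i in range(3, 16 + 1)))[2:].upper()
--     '3D58725572C62302'
--     """
--     assert n >= number, "Error"
--     if n == 0:return 1
--     if n > number:
--         x, y = f(n - 1, False, False, number), f(n - 1, False, False, number - 1)
--         #print x, y
--         if contain_zero:
--             result = (16 - number) * x + (number - 1 if is_begin else number) * y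
--         else:
--             result = (15 - number if is_begin else 16 - number) * x + number * y
--     else:
--         if contain_zero:
--             result = factorial(n - 1) * (n - 1)
--         else:
--             result = factorial(n)
--     #print n, contain_zero, number, result
--     return result
-- ===== SOURCE B (Python) =====
-- from math import factorial
--
-- def f(n, is_begin = True, contain_zero = True, number = 3):
--     # Bottom-up dynamic programme over rows g(k, m) instead of A's branching recursion.
--     assert n >= number, "Error"
--     if n == 0:
--         return 1
--     if n == number:
--         return factorial(n - 1) * (n - 1) if contain_zero else factorial(n)
--     # n > number.  Let g(k, m) = f(k, False, False, m); then
--     #   g(0, m) = 1,  g(k, k) = k!  (k > 0),  g(k, m) = (16-m)*g(k-1, m) + m*g(k-1, m-1)  (k > m).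
--     # Build the rows g(k, .) for k = 1 .. n-1, keeping only the m-window the answer needs.
--     prev = {}
--     for k in range(1, n):
--         cur = {}
--         for m in range(number - (n - 1 - k) - 1, number + 1):
--             if m > k:
--                 continue
--             if m == k:
--                 cur[m] = factorial(k)
--             else:
--                 cur[m] = (16 - m) * prev.get(m, 1) + m * prev.get(m - 1, 1)
--         prev = cur
--     x, y = prev.get(number, 1), prev.get(number - 1, 1)
--     if contain_zero:
--         return (16 - number) * x + (number - 1 if is_begin else number) * y
--     return (15 - number if is_begin else 16 - number) * x + number * y
-- ===== Notes on version B (the rewrite author's own statement) =====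
-- stated objective: alternative
-- what changed: Replaces A's top-down two-branch recursion by a bottom-up dynamic programme that builds each row g(k,m)=f(k,False,False,m) once in a dict, so each (k,m) state is computed once.
import Mathlib
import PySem

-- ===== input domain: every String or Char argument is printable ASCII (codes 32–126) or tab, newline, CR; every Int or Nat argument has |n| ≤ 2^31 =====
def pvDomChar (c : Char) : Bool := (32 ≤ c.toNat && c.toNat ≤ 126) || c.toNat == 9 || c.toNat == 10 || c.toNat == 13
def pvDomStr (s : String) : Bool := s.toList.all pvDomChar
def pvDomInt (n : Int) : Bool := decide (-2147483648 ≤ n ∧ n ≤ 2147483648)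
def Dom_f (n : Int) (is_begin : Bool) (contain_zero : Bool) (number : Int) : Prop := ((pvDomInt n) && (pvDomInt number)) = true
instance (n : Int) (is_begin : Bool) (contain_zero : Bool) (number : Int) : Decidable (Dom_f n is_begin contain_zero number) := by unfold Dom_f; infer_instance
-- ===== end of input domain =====

-- B computes the same value by a bottom-up dynamic programme (one dict row per level) instead of A's branching recursion.

-- math.factorial (arguments are ≥ 0 on every call reached inside Pre_f)
def pyFact (n : Int) : Int := (Nat.factorial n.toNat : Int)

-- ===== PORT A =====
-- literal port of A's recursion; fuel n.toNat+1 is exact on Pre_f (each call decrements n by 1,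
-- recursion stops at n = 0 or n = number); 0 is junk where Python raises (outside Pre_f).
def fA : Nat → Int → Bool → Bool → Int → Int
  | 0, _, _, _, _ => 0
  | (fuel+1), n, is_begin, contain_zero, number =>
    if n < number then 0      -- assert n >= number fails: Python raises (outside Pre_f)
    else if n = 0 then 1
    else if number < n then
      let x := fA fuel (n-1) false false number
      let y := fA fuel (n-1) false false (number-1)
      if contain_zero then (16 - number) * x + (if is_begin then number - 1 else number) * y
      else (if is_begin then 15 - number else 16 - number) * x + number * y
    else
      if contain_zero then pyFact (n-1) * (n-1) else pyFact n

def f (n : Int) (is_begin : Bool) (contain_zero : Bool) (number : Int) : Int :=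
  fA (n.toNat + 1) n is_begin contain_zero number

-- ===== PORT B =====
-- one inner-loop step of B: process key m of the current row (skip if m > k)
def rowF (prev : PySem.Dict Int Int) (k : Int) (cur : PySem.Dict Int Int) (m : Int) : PySem.Dict Int Int :=
  if k < m then cur
  else if m = k then cur.insert m (pyFact k)
  else cur.insert m ((16 - m) * (prev.getD m 1) + m * (prev.getD (m - 1) 1))

-- one outer-loop step of B: build row k (the dict cur) from row k-1 (prev)
def stepRow (n number : Int) (prev : PySem.Dict Int Int) (k : Int) : PySem.Dict Int Int :=
  (PySem.List.pyRange (number - (n - 1 - k) - 1) (number + 1) 1).foldl (rowF prev k) PySem.Dict.empty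

def f_alt (n : Int) (is_begin : Bool) (contain_zero : Bool) (number : Int) : Int :=
  if n < number then 0      -- assert n >= number fails: Python raises (outside Pre_f)
  else if n = 0 then 1
  else if n = number then (if contain_zero then pyFact (n - 1) * (n - 1) else pyFact n)
  else
    let prev := (PySem.List.pyRange 1 n 1).foldl (stepRow n number) PySem.Dict.empty
    let x := prev.getD number 1
    let y := prev.getD (number - 1) 1
    if contain_zero then (16 - number) * x + (if is_begin then number - 1 else number) * y
    else (if is_begin then 15 - number else 16 - number) * x + number * y

-- ===== PRECONDITION & SPEC =====
-- Pre_f: exactly where Python A returns: the assert needs number ≤ n, and any n < 0 reaches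
-- factorial of a negative argument (ValueError).
def Pre_f (n : Int) (is_begin : Bool) (contain_zero : Bool) (number : Int) : Prop :=
  0 ≤ n ∧ number ≤ n
instance (n : Int) (is_begin : Bool) (contain_zero : Bool) (number : Int) : Decidable (Pre_f n is_begin contain_zero number) := by unfold Pre_f; infer_instance

def pvWitness_f : Int × Bool × Bool × Int := (5, true, true, 3)

def Spec_f (n : Int) (is_begin : Bool) (contain_zero : Bool) (number : Int) (out : Int) : Prop := out = f_alt n is_begin contain_zero number
instance (n : Int) (is_begin : Bool) (contain_zero : Bool) (number : Int) (out : Int) : Decidable (Spec_f n is_begin contain_zero number out) := by unfold Spec_f; infer_instance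

-- ===== CLAIM (what is proved, stated in full; the proofs are below) =====
def Claim_equal_f : Prop := ∀ (n : Int) (is_begin : Bool) (contain_zero : Bool) (number : Int), Dom_f n is_begin contain_zero number → Pre_f n is_begin contain_zero number → Spec_f n is_begin contain_zero number (f n is_begin contain_zero number)

-- ===== LEMMAS AND PROOFS =====

-- G k m = A's inner recursion f(k, False, False, m) at its exact fuel
def G (k m : Int) : Int := fA (k.toNat + 1) k false false m

theorem G_zero (m : Int) (h : m ≤ 0) : G 0 m = 1 := by
  unfold G fA
  rw [if_neg (by omega), if_pos rfl]

theorem G_base (k : Int) (h0 : 0 < k) : G k k = pyFact k := by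
  unfold G
  have ht : k.toNat = (k-1).toNat + 1 := by omega
  rw [ht]
  show fA ((k-1).toNat + 1 + 1) k false false k = pyFact k
  rw [fA]
  rw [if_neg (by omega), if_neg (by omega), if_neg (by omega)]
  rfl

theorem G_rec (k m : Int) (h0 : 0 < k) (hm : m < k) :
    G k m = (16 - m) * G (k-1) m + m * G (k-1) (m-1) := by
  unfold G
  have ht : k.toNat = (k-1).toNat + 1 := by omega
  rw [ht]
  show fA ((k-1).toNat + 1 + 1) k false false m = _
  rw [fA]
  rw [if_neg (by omega), if_neg (by omega), if_pos (by omega)]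
  rfl

theorem foldl_rowF_not_mem (prev : PySem.Dict Int Int) (k : Int) (ms : List Int)
    (cur : PySem.Dict Int Int) (m : Int) (h : m ∉ ms) :
    (ms.foldl (rowF prev k) cur).getD m 1 = cur.getD m 1 := by
  induction ms generalizing cur with
  | nil => rfl
  | cons a t ih =>
    have hma : m ≠ a := by intro he; exact h (he ▸ List.mem_cons_self)
    have ht : m ∉ t := fun hmem => h (List.mem_cons_of_mem _ hmem)
    rw [List.foldl_cons, ih _ ht]
    unfold rowF
    split
    · rfl
    · split <;> rw [PySem.Dict.getD_insert_of_ne _ _ _ hma]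

theorem foldl_rowF_mem (prev : PySem.Dict Int Int) (k : Int) (ms : List Int)
    (cur : PySem.Dict Int Int) (m : Int) (hmem : m ∈ ms) (hnd : ms.Nodup) (hmk : ¬ k < m) :
    (ms.foldl (rowF prev k) cur).getD m 1 =
      if m = k then pyFact k else (16 - m) * prev.getD m 1 + m * prev.getD (m - 1) 1 := by
  induction ms generalizing cur with
  | nil => cases hmem
  | cons a t ih =>
    rw [List.foldl_cons]
    rcases List.mem_cons.1 hmem with he | hmem'
    · subst he
      have hnt : m ∉ t := (List.nodup_cons.1 hnd).1
      rw [foldl_rowF_not_mem _ _ _ _ _ hnt]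
      unfold rowF
      rw [if_neg hmk]
      split
      · rw [PySem.Dict.getD_insert_self]
      · rw [PySem.Dict.getD_insert_self]
    · exact ih (rowF prev k cur a) hmem' (List.nodup_cons.1 hnd).2

theorem stepRow_getD (n number : Int) (prev : PySem.Dict Int Int) (k m : Int)
    (h1 : number - (n - 1 - k) - 1 ≤ m) (h2 : m ≤ number) (h3 : m ≤ k) :
    (stepRow n number prev k).getD m 1 =
      if m = k then pyFact k else (16 - m) * prev.getD m 1 + m * prev.getD (m - 1) 1 := by
  unfold stepRow
  exact foldl_rowF_mem _ _ _ _ _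
    (PySem.List.mem_pyRange_one.2 ⟨h1, by omega⟩)
    (PySem.List.nodup_pyRange_one _ _) (by omega)

-- the loop invariant: after building row k, the dict holds G k m on the needed window
def INV (n number k : Int) (d : PySem.Dict Int Int) : Prop :=
  ∀ m : Int, number - (n - 1 - k) - 1 ≤ m → m ≤ number → m ≤ k → d.getD m 1 = G k m

theorem invZero (n number : Int) : INV n number 0 PySem.Dict.empty := by
  intro m _ _ h3
  rw [PySem.Dict.getD_empty, G_zero m h3]

theorem invStep (n number k : Int) (prev : PySem.Dict Int Int)
    (h0 : 0 ≤ k) (hIH : INV n number k prev) :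
    INV n number (k+1) (stepRow n number prev (k+1)) := by
  intro m hlo hhi hmk
  rw [stepRow_getD n number prev (k+1) m (by omega) hhi hmk]
  split
  · next he => rw [he, G_base (k+1) (by omega)]
  · next hne =>
    have hmlt : m < k + 1 := lt_of_le_of_ne hmk hne
    rw [G_rec (k+1) m (by omega) hmlt]
    have e1 : prev.getD m 1 = G k m := hIH m (by omega) hhi (by omega)
    have e2 : prev.getD (m-1) 1 = G k (m-1) := hIH (m-1) (by omega) (by omega) (by omega)
    rw [e1, e2]
    norm_num

theorem loop_inv (n number : Int) : ∀ j : Nat,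
    INV n number (j : Int) ((PySem.List.pyRange 1 ((j : Int) + 1) 1).foldl (stepRow n number) PySem.Dict.empty) := by
  intro j
  induction j with
  | zero =>
    rw [PySem.List.pyRange_one_eq_nil (by norm_num)]
    exact invZero n number
  | succ j ih =>
    have hc : ((j + 1 : Nat) : Int) = (j : Int) + 1 := by push_cast; ring
    rw [hc]
    rw [PySem.List.pyRange_one_append 1 ((j : Int) + 1) ((j : Int) + 1 + 1) (by omega) (by omega),
        PySem.List.pyRange_one_singleton, List.foldl_append, List.foldl_cons, List.foldl_nil]
    exact invStep n number (j : Int) _ (by omega) ih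

-- ===== VERDICT (by name: the statement is the Claim_ definition above) =====
theorem f_spec : Claim_equal_f := by
  intro n is_begin contain_zero number _ hpre
  obtain ⟨hn0, hmn⟩ := hpre
  unfold Spec_f f f_alt
  rw [if_neg (by omega)]
  by_cases hz : n = 0
  · subst hz
    rw [if_pos rfl]
    unfold fA
    rw [if_neg (by omega), if_pos rfl]
  · rw [if_neg hz]
    by_cases heq : n = number
    · rw [if_pos heq]
      have ht : n.toNat + 1 = n.toNat + 1 := rfl
      show fA (n.toNat + 1) n is_begin contain_zero number = _
      have hpos : 0 < n := lt_of_le_of_ne hn0 (Ne.symm hz)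
      have ht2 : n.toNat = (n-1).toNat + 1 := by omega
      rw [ht2]
      rw [fA]
      rw [if_neg (by omega), if_neg (by omega), if_neg (by omega)]
    · rw [if_neg heq]
      have hlt : number < n := lt_of_le_of_ne hmn (by exact fun h => heq h.symm)
      have hpos : 0 < n := lt_of_le_of_ne hn0 (Ne.symm hz)
      -- evaluate A's port one step
      have ht2 : n.toNat = (n-1).toNat + 1 := by omega
      show fA (n.toNat + 1) n is_begin contain_zero number = _
      rw [ht2, fA]
      rw [if_neg (by omega), if_neg (by omega), if_pos (by omega)]
      -- both x and y are G (n-1) _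
      have hj : (((n-1).toNat : Nat) : Int) = n - 1 := by omega
      have hinv := loop_inv n number (n-1).toNat
      rw [hj] at hinv
      have hrange : (n - 1) + 1 = n := by ring
      rw [hrange] at hinv
      have ex : ((PySem.List.pyRange 1 n 1).foldl (stepRow n number) PySem.Dict.empty).getD number 1 = G (n-1) number :=
        hinv number (by omega) (by omega) (by omega)
      have ey : ((PySem.List.pyRange 1 n 1).foldl (stepRow n number) PySem.Dict.empty).getD (number-1) 1 = G (n-1) (number-1) :=
        hinv (number-1) (by omega) (by omega) (by omega)
      simp only [ex, ey]
      rfl
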